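-- pv_equiv track=rewrite | github.com/NickGuAI/g3lobster | g3lobster/memory/handoff.py | _parse_memory_sections
-- ===== SOURCE A (Python) =====
-- def _parse_memory_sections(content: str) -> list[tuple[str, str]]:
--     """Parse MEMORY.md into (title, body) pairs for ## sections."""
--     sections: list[tuple[str, str]] = []
--     current_title = ""
--     current_lines: list[str] = []
--
--     for line in content.splitlines():
--         if line.startswith("## "):
--             if current_title:
--                 sections.append((current_title, "\n".join(current_lines).strip()))
--             current_title = line[3:].strip()
--             current_lines = []
--         elif current_title:
--             current_lines.append(line)
--
--     if current_title:
--         sections.append((current_title, "\n".join(current_lines).strip()))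
--
--     return sections
-- ===== SOURCE B (Python) =====
-- def _parse_memory_sections(content: str) -> list[tuple[str, str]]:
--     """Parse MEMORY.md into (title, body) pairs for ## sections.
--
--     Single reverse pass: walk the lines back-to-front, accumulating the body
--     lines below the current position and emitting a section each time a
--     header line is reached, prepending so the result comes out in order.
--     """
--     sections: list[tuple[str, str]] = []
--     body: list[str] = []
--     for line in reversed(content.splitlines()):
--         if line.startswith("## "):
--             title = line[3:].strip()
--             if title:
--                 sections = [(title, "\n".join(body).strip())] + sections
--             body = []
--         else:
--             body = [line] + body
--     return sections
-- ===== Notes on version B (the rewrite author's own statement) =====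
-- stated objective: alternative
-- what changed: Replaced A's forward scan carrying an open (current_title, current_lines) state plus a trailing flush by a single reverse pass that accumulates the body below the cursor and emits a finished section at each header line, so no end-of-input flush is needed.
import Mathlib
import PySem

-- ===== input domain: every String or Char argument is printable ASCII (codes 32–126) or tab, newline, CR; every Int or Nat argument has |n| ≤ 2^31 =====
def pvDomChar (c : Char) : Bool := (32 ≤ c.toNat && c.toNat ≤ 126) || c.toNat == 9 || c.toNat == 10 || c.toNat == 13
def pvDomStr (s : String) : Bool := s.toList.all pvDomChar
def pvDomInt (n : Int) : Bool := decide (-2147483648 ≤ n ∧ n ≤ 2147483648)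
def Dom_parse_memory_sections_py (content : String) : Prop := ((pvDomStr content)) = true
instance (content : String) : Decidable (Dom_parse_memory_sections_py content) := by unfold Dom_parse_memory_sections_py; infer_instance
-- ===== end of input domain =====

-- B replaces A's forward scan with stateful title tracking by a single reverse
-- pass that emits a section at each header (alternative decomposition; same cost).

-- ===== PORT A =====
-- one loop iteration of A: state = (sections, current_title, current_lines)
def pvA_step (st : List (String × String) × String × List String) (line : String) :
    List (String × String) × String × List String :=
  if PySem.Str.startswith line "## " then
    ((if st.2.1 ≠ "" then st.1 ++ [(st.2.1, PySem.Str.strip (PySem.Str.join "\n" st.2.2))] else st.1),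
     PySem.Str.strip (PySem.Str.slice line (some 3) none), [])
  else if st.2.1 ≠ "" then (st.1, st.2.1, st.2.2 ++ [line])
  else st

-- A's trailing 'if current_title: sections.append(...)'
def pvA_flush (st : List (String × String) × String × List String) : List (String × String) :=
  if st.2.1 ≠ "" then st.1 ++ [(st.2.1, PySem.Str.strip (PySem.Str.join "\n" st.2.2))] else st.1

def parse_memory_sections_py (content : String) : List (String × String) :=
  pvA_flush ((PySem.Str.splitlines content).foldl pvA_step ([], "", []))

-- ===== PORT B =====
-- one step of B's reverse pass: state = (sections, body); foldr = Python's 'for line in reversed(...)'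
def pvB_step (line : String) (st : List (String × String) × List String) :
    List (String × String) × List String :=
  if PySem.Str.startswith line "## " then
    (if PySem.Str.strip (PySem.Str.slice line (some 3) none) ≠ "" then
       (PySem.Str.strip (PySem.Str.slice line (some 3) none),
        PySem.Str.strip (PySem.Str.join "\n" st.2)) :: st.1
     else st.1, [])
  else (st.1, line :: st.2)

def parse_memory_sections_py_alt (content : String) : List (String × String) :=
  ((PySem.Str.splitlines content).foldr pvB_step ([], [])).1

-- ===== PRECONDITION & SPEC =====
def Spec_parse_memory_sections_py (content : String) (out : List (String × String)) : Prop := out = parse_memory_sections_py_alt content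
instance (content : String) (out : List (String × String)) : Decidable (Spec_parse_memory_sections_py content out) := by unfold Spec_parse_memory_sections_py; infer_instance

-- ===== CLAIM (what is proved, stated in full; the proofs are below) =====
def Claim_equal_parse_memory_sections_py : Prop := ∀ (content : String), Dom_parse_memory_sections_py content → Spec_parse_memory_sections_py content (parse_memory_sections_py content)

-- ===== LEMMAS AND PROOFS =====

-- Invariant: A's fold from state (secs, t, cur), then the final flush, equals secs
-- followed by (if a section t is open, that section closed with cur ++ the body
-- lines B collects before the first header, then) B's sections of the rest.
theorem pv_main (ls : List String) :
    ∀ (secs : List (String × String)) (t : String) (cur : List String),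
      pvA_flush (ls.foldl pvA_step (secs, t, cur)) =
        secs ++ (if t = "" then (ls.foldr pvB_step ([], [])).1
                 else (t, PySem.Str.strip (PySem.Str.join "\n" (cur ++ (ls.foldr pvB_step ([], [])).2)))
                        :: (ls.foldr pvB_step ([], [])).1) := by
  induction ls with
  | nil =>
      intro secs t cur
      by_cases ht : t = "" <;> simp [pvA_flush, ht]
  | cons l ls ih =>
      intro secs t cur
      simp only [List.foldl_cons, List.foldr_cons]
      by_cases hs : PySem.Chars.startswith l.toList ['#', '#', ' '] = true
      · by_cases ht : t = ""
        · by_cases hl : PySem.Str.strip (PySem.Str.slice l (some 3) none) = "" <;>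
            simp [pvA_step, pvB_step, hs, ht, hl, ih]
        · by_cases hl : PySem.Str.strip (PySem.Str.slice l (some 3) none) = "" <;>
            simp [pvA_step, pvB_step, hs, ht, hl, ih]
      · by_cases ht : t = ""
        · simp [pvA_step, pvB_step, hs, ht, ih]
        · simp [pvA_step, pvB_step, hs, ht, ih]

-- ===== VERDICT (by name: the statement is the Claim_ definition above) =====
theorem parse_memory_sections_py_spec : Claim_equal_parse_memory_sections_py := by
  intro content _
  unfold Spec_parse_memory_sections_py parse_memory_sections_py parse_memory_sections_py_alt
  simpa using pv_main (PySem.Str.splitlines content) [] "" []
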